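-- pv_equiv track=rewrite | github.com/vitorascorrea/advent-of-code-2024 | day_01/solution.py | part_two
-- ===== SOURCE A (Python) =====
-- def part_two(left_numbers, right_numbers):
--   right_numbers_frequency = {}
--
--   for number in right_numbers:
--     if not number in right_numbers_frequency:
--       right_numbers_frequency[number] = 1
--     else:
--       right_numbers_frequency[number] += 1
--
--   total = 0
--
--   for number in left_numbers:
--     if number in right_numbers_frequency:
--       total += number * right_numbers_frequency[number]
--
--   return total
-- ===== SOURCE B (Python) =====
-- def part_two(left_numbers, right_numbers):
--   # Sort both lists and sweep them with two pointers (merge-style):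
--   # for each left element, the matching run in the sorted right list gives its frequency.
--   ls = sorted(left_numbers)
--   rs = sorted(right_numbers)
--   total = 0
--   i = j = 0
--   while i < len(ls) and j < len(rs):
--     a, b = ls[i], rs[j]
--     if a < b:
--       i += 1
--     elif b < a:
--       j += 1
--     else:
--       run = 0
--       k = j
--       while k < len(rs) and rs[k] == a:
--         run += 1
--         k += 1
--       total += a * run
--       i += 1
--   return total
-- ===== Notes on version B (the rewrite author's own statement) =====
-- stated objective: alternative
-- what changed: Replaces the frequency-dictionary build-then-lookup with a sort-then-merge sweep: both lists are sorted and traversed with two pointers, multiplying each left element by the length of its matching run in the sorted right list.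
import Mathlib
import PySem

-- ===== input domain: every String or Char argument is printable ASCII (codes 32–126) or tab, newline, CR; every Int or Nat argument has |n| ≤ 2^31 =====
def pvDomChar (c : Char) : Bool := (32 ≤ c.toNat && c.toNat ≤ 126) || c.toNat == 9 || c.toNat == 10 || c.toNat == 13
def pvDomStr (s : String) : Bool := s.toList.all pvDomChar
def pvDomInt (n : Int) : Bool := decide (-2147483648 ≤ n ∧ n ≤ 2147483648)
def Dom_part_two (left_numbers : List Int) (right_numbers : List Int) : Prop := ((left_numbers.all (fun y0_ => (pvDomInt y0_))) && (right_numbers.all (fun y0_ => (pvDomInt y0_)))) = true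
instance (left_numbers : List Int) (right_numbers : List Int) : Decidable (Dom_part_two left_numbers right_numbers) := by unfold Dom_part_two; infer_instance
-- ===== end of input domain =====

-- B replaces A's frequency-dictionary build-then-lookup with a sort-then-merge two-pointer
-- sweep over both sorted lists; objective: alternative algorithm, same result.

-- ===== PORT A =====
-- A-side helper: the body of A's frequency-building loop (if/else update).
def freqStep (d : PySem.Dict Int Int) (number : Int) : PySem.Dict Int Int :=
  if !(d.contains number) then d.insert number 1
  else d.insert number (d.getD number 0 + 1)

def part_two (left_numbers : List Int) (right_numbers : List Int) : Int :=
  let right_numbers_frequency : PySem.Dict Int Int :=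
    right_numbers.foldl freqStep PySem.Dict.empty
  left_numbers.foldl
    (fun total number =>
      if right_numbers_frequency.contains number then
        total + number * right_numbers_frequency.getD number 0
      else total)
    0

-- ===== PORT B =====
-- Source B's inner while loop: length of the run of elements equal to v at the front of the list.
def runLen (v : Int) : List Int → Int
  | [] => 0
  | b :: bs => if b = v then 1 + runLen v bs else 0

-- Source B's outer while loop over the two sorted lists (suffixes stand for the indices i, j).
def sweep : List Int → List Int → Int → Int
  | [], _, total => total
  | _ :: _, [], total => total
  | a :: as_, b :: bs, total =>
    if a < b then sweep as_ (b :: bs) total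
    else if b < a then sweep (a :: as_) bs total
    else sweep as_ (b :: bs) (total + a * runLen a (b :: bs))
termination_by ls rs _ => ls.length + rs.length
decreasing_by all_goals (simp; try omega)

def part_two_alt (left_numbers : List Int) (right_numbers : List Int) : Int :=
  sweep (PySem.List.sorted left_numbers (fun x => x) false)
        (PySem.List.sorted right_numbers (fun x => x) false) 0

-- ===== PRECONDITION & SPEC =====
def Spec_part_two (left_numbers : List Int) (right_numbers : List Int) (out : Int) : Prop := out = part_two_alt left_numbers right_numbers
instance (left_numbers : List Int) (right_numbers : List Int) (out : Int) : Decidable (Spec_part_two left_numbers right_numbers out) := by unfold Spec_part_two; infer_instance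

-- ===== CLAIM (what is proved, stated in full; the proofs are below) =====
def Claim_equal_part_two : Prop := ∀ (left_numbers : List Int) (right_numbers : List Int), Dom_part_two left_numbers right_numbers → Spec_part_two left_numbers right_numbers (part_two left_numbers right_numbers)

-- ===== LEMMAS AND PROOFS =====

-- A's if/else frequency update is the plain "insert (getD + 1)" counter update.
lemma freqStep_eq :
    freqStep = fun d number => d.insert number (d.getD number 0 + 1) := by
  funext d n
  unfold freqStep
  by_cases h : d.contains n = true
  · simp [h]
  · simp only [Bool.not_eq_true] at h
    simp [h, PySem.Dict.getD_of_not_contains _ _ h]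

lemma freq_getD (right_numbers : List Int) (v : Int) :
    (right_numbers.foldl freqStep PySem.Dict.empty).getD v 0
      = (right_numbers.count v : Int) := by
  rw [freqStep_eq]
  rw [PySem.Dict.getD_foldl_insert_add_one]
  simp [PySem.Dict.getD_empty]

lemma freq_contains (right_numbers : List Int) (v : Int) :
    (right_numbers.foldl freqStep PySem.Dict.empty).contains v
      = right_numbers.contains v := by
  rw [freqStep_eq]
  rw [PySem.Dict.foldl_insert_getD_add_one_eq_counter,
      PySem.Dict.contains_counter]

-- A's second loop computes Σ x * count x right over the left list.
lemma loop_eq (right_numbers left_numbers : List Int) (acc : Int) :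
    left_numbers.foldl
      (fun total number =>
        if (right_numbers.foldl freqStep PySem.Dict.empty).contains number then
          total + number * (right_numbers.foldl freqStep PySem.Dict.empty).getD number 0
        else total)
      acc
    = acc + (left_numbers.map (fun number => number * (right_numbers.count number : Int))).sum := by
  induction left_numbers generalizing acc with
  | nil => simp
  | cons n ns ih =>
    simp only [List.foldl_cons, List.map_cons, List.sum_cons, ih]
    rw [freq_getD, freq_contains]
    by_cases h : right_numbers.contains n = true
    · simp only [h, if_true]
      ring
    · simp only [Bool.not_eq_true] at h
      have hc : right_numbers.count n = 0 := by
        simp only [List.contains_eq_mem, decide_eq_false_iff_not] at h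
        exact List.count_eq_zero.mpr h
      simp [hc]

-- The inner while loop counts all occurrences when the list is sorted and bounded below by v.
lemma runLen_eq_count (v : Int) (l : List Int)
    (hs : l.Pairwise (· ≤ ·)) (hb : ∀ x ∈ l, v ≤ x) :
    runLen v l = (l.count v : Int) := by
  induction l with
  | nil => simp [runLen]
  | cons b bs ih =>
    rw [List.pairwise_cons] at hs
    by_cases h : b = v
    · subst h
      simp only [runLen, List.count_cons_self]
      rw [ih hs.2 (fun x hx => hs.1 x hx)]
      push_cast; ring
    · have hvb : v < b := lt_of_le_of_ne (hb b (List.mem_cons_self)) (fun e => h e.symm)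
      have hz : (b :: bs).count v = 0 := by
        refine List.count_eq_zero.mpr ?_
        intro hm
        rcases List.mem_cons.mp hm with h1 | h1
        · exact h h1.symm
        · exact absurd (hs.1 v h1) (not_le.mpr hvb)
      simp [runLen, h, hz]

-- In a sorted list headed by b, a value below b does not occur.
lemma count_zero_of_lt_head (a b : Int) (bs : List Int)
    (hs : (b :: bs).Pairwise (· ≤ ·)) (hab : a < b) :
    (b :: bs).count a = 0 := by
  rw [List.pairwise_cons] at hs
  refine List.count_eq_zero.mpr ?_
  intro hm
  rcases List.mem_cons.mp hm with h1 | h1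
  · omega
  · exact absurd (hs.1 a h1) (by omega)

-- The sweep over two sorted lists computes Σ x * count x rs over ls.
lemma sweep_eq (ls rs : List Int) (acc : Int) :
    ls.Pairwise (· ≤ ·) → rs.Pairwise (· ≤ ·) →
    sweep ls rs acc = acc + (ls.map (fun x => x * (rs.count x : Int))).sum := by
  fun_induction sweep ls rs acc with
  | case1 rs acc => simp
  | case2 a as_ acc => simp
  | case3 a as_ b bs acc hab ih =>
    intro hl hr
    rw [List.pairwise_cons] at hl
    rw [ih hl.2 hr]
    rw [List.map_cons, List.sum_cons, count_zero_of_lt_head a b bs hr hab]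
    simp
  | case4 a as_ b bs acc hab hba ih =>
    intro hl hr
    rw [List.pairwise_cons] at hr
    rw [ih hl hr.2]
    congr 1
    congr 1
    apply List.map_congr_left
    intro x hx
    have hax : a ≤ x := by
      rcases List.mem_cons.mp hx with h1 | h1
      · omega
      · exact (List.pairwise_cons.mp hl).1 x h1
    have : x ≠ a → x ≠ b := by omega
    rw [List.count_cons]
    have hxb : ¬ (b = x) := by omega
    simp [hxb]
  | case5 a as_ b bs acc hab hba ih =>
    intro hl hr
    rw [List.pairwise_cons] at hl
    rw [ih hl.2 hr]
    have hba' : b = a := le_antisymm (by omega) (by omega)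
    subst hba'
    have hb : ∀ x ∈ b :: bs, b ≤ x := by
      intro x hx
      rcases List.mem_cons.mp hx with h1 | h1
      · omega
      · exact (List.pairwise_cons.mp hr).1 x h1
    rw [runLen_eq_count b (b :: bs) hr hb]
    simp only [List.map_cons, List.sum_cons]
    ring

-- ===== VERDICT (by name: the statement is the Claim_ definition above) =====
theorem part_two_spec : Claim_equal_part_two := by
  intro l r _
  show part_two l r = part_two_alt l r
  have hA : part_two l r
      = (l.map (fun x => x * (r.count x : Int))).sum := by
    have h := loop_eq r l 0
    rw [zero_add] at h
    exact h
  have hpl : (PySem.List.sorted l (fun x => x) false).Perm l :=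
    PySem.List.sorted_perm l (fun x => x) false
  have hpr : (PySem.List.sorted r (fun x => x) false).Perm r :=
    PySem.List.sorted_perm r (fun x => x) false
  have hB : part_two_alt l r
      = ((PySem.List.sorted l (fun x => x) false).map
          (fun x => x * ((PySem.List.sorted r (fun x => x) false).count x : Int))).sum := by
    unfold part_two_alt
    have := sweep_eq (PySem.List.sorted l (fun x => x) false)
      (PySem.List.sorted r (fun x => x) false) 0
      (by simpa using PySem.List.sorted_pairwise l (fun x => x))
      (by simpa using PySem.List.sorted_pairwise r (fun x => x))
    rw [this, zero_add]
  rw [hA, hB]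
  have hcnt : ∀ x : Int, (PySem.List.sorted r (fun x => x) false).count x = r.count x :=
    fun x => hpr.count_eq x
  have : ((PySem.List.sorted l (fun x => x) false).map
          (fun x => x * ((PySem.List.sorted r (fun x => x) false).count x : Int))).sum
      = ((PySem.List.sorted l (fun x => x) false).map
          (fun x => x * (r.count x : Int))).sum := by
    congr 1
    exact List.map_congr_left (fun x _ => by rw [hcnt x])
  rw [this]
  exact ((hpl.map _).sum_eq).symm
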